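-- pv_equiv track=rewrite | github.com/LleilaA13/Python-practice | exercise20/program.py | es50
-- ===== SOURCE A (Python) =====
-- def es50(s, k):
--     '''Write the function es50(s,k) that:
--
--       - receives as an input a string s of characters that are the
--         digits from '0' to '9' and an integer k
--
--       - builds the list of all the different substrings of s, with
--         length k, whose characters are in a striclty increasing order
--
--       and returns the list of such substrings, ordering the items in a
--       descreasing order.
--
--     Note that the list must not contain duplicates.
--
--     Remember that a substring is what you get from s by deleting 0 or
--     more initial characters and 0 or more final characters.
--
--     EXAMPLES:
--
--     with s='9135918246556' and k=3 the function returns the list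
--     ['359','246', 135']
--
--     with s='1234123412341234' and k=3 the function returns the list
--     ['234',123']
--
--     with s='987654321' and k=3 the function returns the list []
--
--     '''
--     # enter your code here
--
--     unique_substrings = set()
--
--     for i in range(len(s) - k + 1):
--       sub = s[i:i+k]
--       if all(sub[j] < sub[j+1] for j in range(k-1)):
--         unique_substrings.add(sub)
--
--     result = sorted(list(unique_substrings), reverse=True)
--     return result
-- ===== SOURCE B (Python) =====
-- def es50(s, k):
--     # Pass 1: maximal strictly-increasing runs [start, end) of s.
--     runs = []
--     i = 0
--     n = len(s)
--     while i < n: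
--         j = i + 1
--         while j < n and s[j - 1] < s[j]:
--             j += 1
--         runs.append((i, j))
--         i = j
--     # Pass 2: every length-k window inside a run is strictly increasing.
--     found = set()
--     for (a, e) in runs:
--         if e - a >= k:
--             for j in range(a, e - k + 1):
--                 found.add(s[j:j + k])
--     return sorted(found, reverse=True)
-- ===== Notes on version B (the rewrite author's own statement) =====
-- stated objective: faster
-- what changed: Instead of testing every length-k window character by character, B first computes the maximal strictly-increasing runs of s in one pass and then emits every length-k slice lying inside a run.
-- outside the precondition, e.g. on es50('', 0): A returns [''], B returns []
import Mathlib
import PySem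

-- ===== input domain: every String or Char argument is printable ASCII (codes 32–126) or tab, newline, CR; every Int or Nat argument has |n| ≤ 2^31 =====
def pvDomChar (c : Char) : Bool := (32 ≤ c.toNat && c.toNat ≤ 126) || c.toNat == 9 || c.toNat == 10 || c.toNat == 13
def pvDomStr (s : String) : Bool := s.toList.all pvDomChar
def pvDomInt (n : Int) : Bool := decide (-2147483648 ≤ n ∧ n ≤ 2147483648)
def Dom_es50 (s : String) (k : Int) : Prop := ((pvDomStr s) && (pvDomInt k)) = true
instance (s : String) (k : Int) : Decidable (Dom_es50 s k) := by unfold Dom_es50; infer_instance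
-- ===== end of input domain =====

-- B replaces A's per-window character-by-character check by one pass that finds the maximal
-- strictly-increasing runs of s and then emits every length-k slice inside a run (measured faster in a timing run).

-- ===== PORT A =====
-- literal port of A: for each window start i, test the window char by char, collect in a set, sort descending.
-- (the IndexError branch of sub[j]/sub[j+1] is unreachable: 0 ≤ j < k-1 and the window has length k there)
def es50 (s : String) (k : Int) : List String :=
  let n : Int := PySem.Str.len s
  let uniq : PySem.Set String :=
    (PySem.List.pyRange 0 (n - k + 1) 1).foldl (fun acc i =>
      let sub := PySem.Str.slice s (some i) (some (i + k))
      if (PySem.List.pyRange 0 (k - 1) 1).all (fun j =>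
            match PySem.Str.pyGet? sub j, PySem.Str.pyGet? sub (j + 1) with
            | some c1, some c2 => decide (c1 < c2)
            | _, _ => false)
      then PySem.Set.add acc sub else acc) (PySem.Set.ofList [])
  PySem.List.sorted uniq (fun x => x) true

-- ===== PORT B =====
-- inner while loop of B: extend the run end j while j < n and s[j-1] < s[j]
def runEnd (cs : List Char) (j : Nat) : Nat :=
  if h : j < cs.length ∧ cs.getD (j - 1) 'A' < cs.getD j 'A' then runEnd cs (j + 1) else j
termination_by cs.length - j
decreasing_by omega

-- outer while loop of B: collect the runs [i, runEnd (i+1)) covering s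
theorem le_runEnd (cs : List Char) (j : Nat) : j ≤ runEnd cs j := by
  fun_induction runEnd cs j with
  | case1 j h ih => omega
  | case2 j h => omega

def runsFrom (cs : List Char) (i : Nat) : List (Nat × Nat) :=
  if h : i < cs.length then (i, runEnd cs (i + 1)) :: runsFrom cs (runEnd cs (i + 1)) else []
termination_by cs.length - i
decreasing_by have := le_runEnd cs (i + 1); omega

def es50_alt (s : String) (k : Int) : List String :=
  let cs := s.toList
  let runs := runsFrom cs 0
  let found : PySem.Set String :=
    runs.foldl (fun acc ab =>
      if k ≤ (ab.2 : Int) - (ab.1 : Int) then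
        (PySem.List.pyRange (ab.1 : Int) ((ab.2 : Int) - k + 1) 1).foldl
          (fun acc2 j => PySem.Set.add acc2 (PySem.Str.slice s (some j) (some (j + k)))) acc
      else acc) (PySem.Set.ofList [])
  PySem.List.sorted found (fun x => x) true

-- ===== PRECONDITION & SPEC =====
-- Pre_ excludes only the empty string with k ≤ 0: there A returns [''] (the empty window) while
-- run-based B, having no runs to scan, returns [] — both defensible for that degenerate query.
def Pre_es50 (s : String) (k : Int) : Prop := s ≠ "" ∨ 1 ≤ k
instance (s : String) (k : Int) : Decidable (Pre_es50 s k) := by unfold Pre_es50; infer_instance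
def pvWitness_es50 : String × Int := ("9135918246556", 3)
def Spec_es50 (s : String) (k : Int) (out : List String) : Prop := out = es50_alt s k
instance (s : String) (k : Int) (out : List String) : Decidable (Spec_es50 s k out) := by unfold Spec_es50; infer_instance

-- ===== CLAIM (what is proved, stated in full; the proofs are below) =====
def Claim_equal_es50 : Prop := ∀ (s : String) (k : Int), Dom_es50 s k → Pre_es50 s k → Spec_es50 s k (es50 s k)

-- ===== LEMMAS AND PROOFS =====

-- properties of the inner while loop (runEnd)
theorem runEnd_le (cs : List Char) (j : Nat) (h : j ≤ cs.length) : runEnd cs j ≤ cs.length := by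
  fun_induction runEnd cs j with
  | case1 j h' ih => exact ih (by omega)
  | case2 j h' => exact h

theorem runEnd_inc (cs : List Char) (j : Nat) :
    ∀ t, j ≤ t → t < runEnd cs j → t < cs.length ∧ cs.getD (t - 1) 'A' < cs.getD t 'A' := by
  fun_induction runEnd cs j with
  | case1 j h ih =>
    intro t ht1 ht2
    rcases Nat.eq_or_lt_of_le ht1 with rfl | h'
    · exact ⟨h.1, h.2⟩
    · exact ih t h' ht2
  | case2 j h =>
    intro t ht1 ht2; omega

theorem runEnd_stop (cs : List Char) (j : Nat) :
    ¬ (runEnd cs j < cs.length ∧ cs.getD (runEnd cs j - 1) 'A' < cs.getD (runEnd cs j) 'A') := by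
  fun_induction runEnd cs j with
  | case1 j h ih => exact ih
  | case2 j h => exact h

-- properties of the outer while loop (runsFrom)
theorem runsFrom_bounds (cs : List Char) (i : Nat) :
    ∀ ab ∈ runsFrom cs i, i ≤ ab.1 ∧ ab.1 < ab.2 ∧ ab.2 ≤ cs.length ∧ ab.2 = runEnd cs (ab.1 + 1) := by
  fun_induction runsFrom cs i with
  | case1 i h ih =>
    intro ab hab
    rcases List.mem_cons.1 hab with rfl | hab'
    · have h1 := le_runEnd cs (i + 1)
      have h2 := runEnd_le cs (i + 1) (by omega)
      exact ⟨le_refl _, by omega, h2, rfl⟩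
    · have := ih ab hab'
      have h1 := le_runEnd cs (i + 1)
      exact ⟨by omega, this.2⟩
  | case2 i h => intro ab hab; simp at hab

theorem runsFrom_cover (cs : List Char) (i : Nat) :
    ∀ t, i ≤ t → t < cs.length → ∃ ab ∈ runsFrom cs i, ab.1 ≤ t ∧ t < ab.2 := by
  fun_induction runsFrom cs i with
  | case1 i h ih =>
    intro t ht1 ht2
    by_cases h' : t < runEnd cs (i + 1)
    · exact ⟨(i, runEnd cs (i + 1)), List.mem_cons_self, ht1, h'⟩
    · obtain ⟨ab, hab, h1, h2⟩ := ih t (by omega) ht2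
      exact ⟨ab, List.mem_cons_of_mem _ hab, h1, h2⟩
  | case2 i h => intro t ht1 ht2; omega

-- membership and nodup for A's collection loop
theorem memA {β : Type} [BEq β] [LawfulBEq β] (l : List Int) (c : Int → Bool) (f : Int → β)
    (s : PySem.Set β) (y : β) :
    y ∈ l.foldl (fun acc i => if c i then PySem.Set.add acc (f i) else acc) s ↔
      y ∈ s ∨ ∃ i ∈ l, c i = true ∧ y = f i := by
  induction l generalizing s with
  | nil => simp
  | cons hd tl ih =>
    simp only [List.foldl_cons, ih]
    by_cases hc : c hd = true
    · simp only [hc, if_true, PySem.Set.mem_add, List.mem_cons]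
      constructor
      · rintro ((h | rfl) | ⟨i, hi, hci, hyi⟩)
        · exact Or.inl h
        · exact Or.inr ⟨hd, Or.inl rfl, hc, rfl⟩
        · exact Or.inr ⟨i, Or.inr hi, hci, hyi⟩
      · rintro (h | ⟨i, (rfl | hi), hci, hyi⟩)
        · exact Or.inl (Or.inl h)
        · exact Or.inl (Or.inr hyi)
        · exact Or.inr ⟨i, hi, hci, hyi⟩
    · simp only [hc, List.mem_cons]
      constructor
      · rintro (h | ⟨i, hi, hci, hyi⟩)
        · exact Or.inl h
        · exact Or.inr ⟨i, Or.inr hi, hci, hyi⟩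
      · rintro (h | ⟨i, (rfl | hi), hci, hyi⟩)
        · exact Or.inl h
        · exact absurd hci hc
        · exact Or.inr ⟨i, hi, hci, hyi⟩

theorem nodupA {β : Type} [BEq β] [LawfulBEq β] (l : List Int) (c : Int → Bool) (f : Int → β)
    (s : PySem.Set β) (hs : s.Nodup) :
    (l.foldl (fun acc i => if c i then PySem.Set.add acc (f i) else acc) s).Nodup := by
  induction l generalizing s with
  | nil => exact hs
  | cons hd tl ih =>
    simp only [List.foldl_cons]
    by_cases hc : c hd = true
    · simp only [hc, if_true]; exact ih _ (PySem.Set.nodup_add _ _ hs)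
    · simp only [hc]; exact ih _ hs

-- membership and nodup for B's collection loop
theorem memB (runs : List (Nat × Nat)) (k : Int) (g : Int → String) (s0 : PySem.Set String)
    (y : String) :
    y ∈ runs.foldl (fun acc ab =>
        if k ≤ (ab.2 : Int) - (ab.1 : Int) then
          (PySem.List.pyRange (ab.1 : Int) ((ab.2 : Int) - k + 1) 1).foldl
            (fun acc2 j => PySem.Set.add acc2 (g j)) acc
        else acc) s0 ↔
      y ∈ s0 ∨ ∃ ab ∈ runs, k ≤ (ab.2 : Int) - (ab.1 : Int) ∧
        ∃ j ∈ PySem.List.pyRange (ab.1 : Int) ((ab.2 : Int) - k + 1) 1, y = g j := by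
  induction runs generalizing s0 with
  | nil => simp
  | cons hd tl ih =>
    simp only [List.foldl_cons, ih]
    by_cases hc : k ≤ (hd.2 : Int) - (hd.1 : Int)
    · simp only [hc, if_true, PySem.Set.mem_foldl_add]
      constructor
      · rintro ((h | ⟨j, hj, rfl⟩) | ⟨ab, hab, h1, h2⟩)
        · exact Or.inl h
        · exact Or.inr ⟨hd, List.mem_cons_self, hc, j, hj, rfl⟩
        · exact Or.inr ⟨ab, List.mem_cons_of_mem _ hab, h1, h2⟩
      · rintro (h | ⟨ab, hab, h1, h2⟩)
        · exact Or.inl (Or.inl h)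
        · rcases List.mem_cons.1 hab with rfl | hab'
          · obtain ⟨j, hj, rfl⟩ := h2; exact Or.inl (Or.inr ⟨j, hj, rfl⟩)
          · exact Or.inr ⟨ab, hab', h1, h2⟩
    · simp only [hc]
      constructor
      · rintro (h | ⟨ab, hab, h1, h2⟩)
        · exact Or.inl h
        · exact Or.inr ⟨ab, List.mem_cons_of_mem _ hab, h1, h2⟩
      · rintro (h | ⟨ab, hab, h1, h2⟩)
        · exact Or.inl h
        · rcases List.mem_cons.1 hab with rfl | hab'
          · exact absurd h1 hc
          · exact Or.inr ⟨ab, hab', h1, h2⟩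

theorem nodupB (runs : List (Nat × Nat)) (k : Int) (g : Int → String) (s0 : PySem.Set String)
    (hs : s0.Nodup) :
    (runs.foldl (fun acc ab =>
        if k ≤ (ab.2 : Int) - (ab.1 : Int) then
          (PySem.List.pyRange (ab.1 : Int) ((ab.2 : Int) - k + 1) 1).foldl
            (fun acc2 j => PySem.Set.add acc2 (g j)) acc
        else acc) s0).Nodup := by
  induction runs generalizing s0 with
  | nil => exact hs
  | cons hd tl ih =>
    simp only [List.foldl_cons]
    by_cases hc : k ≤ (hd.2 : Int) - (hd.1 : Int)
    · simp only [hc, if_true]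
      refine ih _ ?_
      rw [← PySem.Set.update_map_eq_foldl_add]
      exact PySem.Set.nodup_update _ _ hs
    · simp only [hc]; exact ih _ hs

-- evaluating A's window slice at a valid offset
theorem sub_get (s : String) (i k : Int) (hi : 0 ≤ i) (hk : 0 ≤ k) (m : Nat)
    (hm : (m : Int) < k) (hin : i + k ≤ (s.toList.length : Int)) :
    PySem.Str.pyGet? (PySem.Str.slice s (some i) (some (i + k))) (m : Int)
      = some (s.toList.getD (i.toNat + m) 'A') := by
  rw [PySem.Str.pyGet?_natCast]
  have h1 : (PySem.Str.slice s (some i) (some (i + k))).toList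
      = (s.toList.drop i.toNat).take ((i + k).toNat - i.toNat) := by
    rw [PySem.Str.toList_slice, PySem.Chars.slice_eq_listSlice,
      PySem.List.slice_toNat s.toList hi (by omega)]
  rw [h1, List.getElem?_take, if_pos (by omega), List.getElem?_drop]
  rw [List.getD_eq_getElem?_getD, List.getElem?_eq_getElem (by omega)]
  simp

-- the window test of A, characterised: a length-k window starting at i is strictly increasing
theorem condA_iff (s : String) (k : Int) (i : Int) (hk : 1 ≤ k) (hi : 0 ≤ i)
    (hin : i + k ≤ (s.toList.length : Int)) :
    ((PySem.List.pyRange 0 (k - 1) 1).all (fun j =>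
        match PySem.Str.pyGet? (PySem.Str.slice s (some i) (some (i + k))) j,
              PySem.Str.pyGet? (PySem.Str.slice s (some i) (some (i + k))) (j + 1) with
        | some c1, some c2 => decide (c1 < c2)
        | _, _ => false) = true) ↔
      (∀ t : Nat, i.toNat ≤ t → (t : Int) + 1 < i + k →
        s.toList.getD t 'A' < s.toList.getD (t + 1) 'A') := by
  rw [List.all_eq_true]
  constructor
  · intro h t ht1 ht2
    have hmem : ((t - i.toNat : Nat) : Int) ∈ PySem.List.pyRange 0 (k - 1) 1 :=
      PySem.List.mem_pyRange_one.mpr ⟨by omega, by omega⟩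
    have hx := h _ hmem
    rw [sub_get s i k hi (by omega) (t - i.toNat) (by omega) hin,
      show ((t - i.toNat : Nat) : Int) + 1 = (((t - i.toNat) + 1 : Nat) : Int) by push_cast; ring,
      sub_get s i k hi (by omega) ((t - i.toNat) + 1) (by omega) hin] at hx
    simp only [decide_eq_true_eq] at hx
    rw [show i.toNat + (t - i.toNat) = t by omega,
      show i.toNat + ((t - i.toNat) + 1) = t + 1 by omega] at hx
    exact hx
  · intro h j hj
    obtain ⟨hj0, hj1⟩ := PySem.List.mem_pyRange_one.mp hj
    rw [show j = ((j.toNat : Nat) : Int) from (Int.toNat_of_nonneg hj0).symm]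
    rw [sub_get s i k hi (by omega) j.toNat (by omega) hin,
      show ((j.toNat : Nat) : Int) + 1 = ((j.toNat + 1 : Nat) : Int) by push_cast; ring,
      sub_get s i k hi (by omega) (j.toNat + 1) (by omega) hin]
    simp only [decide_eq_true_eq]
    have hx := h (i.toNat + j.toNat) (by omega) (by push_cast; omega)
    rw [show i.toNat + j.toNat + 1 = i.toNat + (j.toNat + 1) by omega] at hx
    exact hx

-- KEY: A's accepted window starts = starts covered by some run of B
theorem key_index (s : String) (k : Int) (hpre : s ≠ "" ∨ 1 ≤ k) (i : Int) :
    (0 ≤ i ∧ i < (s.toList.length : Int) - k + 1 ∧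
      (PySem.List.pyRange 0 (k - 1) 1).all (fun j =>
        match PySem.Str.pyGet? (PySem.Str.slice s (some i) (some (i + k))) j,
              PySem.Str.pyGet? (PySem.Str.slice s (some i) (some (i + k))) (j + 1) with
        | some c1, some c2 => decide (c1 < c2)
        | _, _ => false) = true) ↔
      ∃ ab ∈ runsFrom s.toList 0, (ab.1 : Int) ≤ i ∧ i < (ab.2 : Int) - k + 1 := by
  by_cases hk : 1 ≤ k
  · constructor
    · rintro ⟨hi0, hi1, hc⟩
      have hn : i + k ≤ (s.toList.length : Int) := by omega
      have hcc := (condA_iff s k i hk hi0 hn).mp hc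
      obtain ⟨ab, hab, h1, h2⟩ := runsFrom_cover s.toList 0 i.toNat (Nat.zero_le _) (by omega)
      obtain ⟨-, hab2, hab3, habE⟩ := runsFrom_bounds s.toList 0 ab hab
      refine ⟨ab, hab, by omega, ?_⟩
      by_contra hcon
      have hcon' : (ab.2 : Int) - k + 1 ≤ i := not_lt.mp hcon
      have hstop := runEnd_stop s.toList (ab.1 + 1)
      rw [← habE] at hstop
      apply hstop
      refine ⟨by omega, ?_⟩
      have hx := hcc (ab.2 - 1) (by omega) (by omega)
      rw [show ab.2 - 1 + 1 = ab.2 by omega] at hx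
      exact hx
    · rintro ⟨ab, hab, h1, h2⟩
      obtain ⟨-, hab2, hab3, habE⟩ := runsFrom_bounds s.toList 0 ab hab
      have hi0 : 0 ≤ i := le_trans (by positivity) h1
      refine ⟨hi0, by omega, ?_⟩
      rw [condA_iff s k i hk hi0 (by omega)]
      intro t ht1 ht2
      have hinc := runEnd_inc s.toList (ab.1 + 1) (t + 1) (by omega)
        (by rw [← habE]; omega)
      have hx := hinc.2
      simpa using hx
  · have hs : s.toList ≠ [] := by
      rcases hpre with h | h
      · intro hnil; exact h (String.toList_eq_nil_iff.mp hnil)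
      · omega
    have hn1 : 1 ≤ s.toList.length := List.length_pos_iff.mpr hs
    constructor
    · rintro ⟨hi0, hi1, -⟩
      by_cases hcase : i < (s.toList.length : Int)
      · obtain ⟨ab, hab, h1, h2⟩ := runsFrom_cover s.toList 0 i.toNat (Nat.zero_le _) (by omega)
        obtain ⟨-, hab2, hab3, -⟩ := runsFrom_bounds s.toList 0 ab hab
        exact ⟨ab, hab, by omega, by omega⟩
      · obtain ⟨ab, hab, h1, h2⟩ :=
          runsFrom_cover s.toList 0 (s.toList.length - 1) (Nat.zero_le _) (by omega)
        obtain ⟨-, hab2, hab3, -⟩ := runsFrom_bounds s.toList 0 ab hab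
        exact ⟨ab, hab, by omega, by omega⟩
    · rintro ⟨ab, hab, h1, h2⟩
      obtain ⟨-, hab2, hab3, -⟩ := runsFrom_bounds s.toList 0 ab hab
      refine ⟨le_trans (by positivity) h1, by omega, ?_⟩
      rw [PySem.List.pyRange_one_eq_nil (by omega)]
      rfl

-- sorted(·, reverse=True) of two nodup lists with the same elements agree
theorem sorted_rev_congr (xs ys : List String) (hx : xs.Nodup) (hp : xs.Perm ys) :
    PySem.List.sorted xs (fun x => x) true = PySem.List.sorted ys (fun x => x) true := by
  have hzx : (PySem.List.sorted xs (fun x => x) true).Perm xs := PySem.List.sorted_perm _ _ _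
  have hnd : (PySem.List.sorted xs (fun x => x) true).Nodup := hzx.nodup_iff.mpr hx
  have hle : (PySem.List.sorted xs (fun x => x) true).Pairwise (fun a b => b ≤ a) :=
    PySem.List.sorted_pairwise_rev xs (fun x => x)
  have hlt : (PySem.List.sorted xs (fun x => x) true).Pairwise (fun a b : String => b < a) :=
    (hle.and hnd).imp (fun {a b} h => lt_of_le_of_ne h.1 (Ne.symm h.2))
  rw [PySem.List.sorted_rev_eq_of_perm_of_pairwise_gt xs _ (fun x => x) hzx hlt,
    PySem.List.sorted_rev_eq_of_perm_of_pairwise_gt ys _ (fun x => x) (hzx.trans hp) hlt]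

-- ===== VERDICT (by name: the statement is the Claim_ definition above) =====
theorem es50_spec : Claim_equal_es50 := by
  intro s k _hdom hpre
  have hpre' : s ≠ "" ∨ 1 ≤ k := hpre
  unfold Spec_es50 es50 es50_alt
  simp only []
  have hlen : PySem.Str.len s = (s.toList.length : Int) := by
    simp [PySem.Str.len_eq]
  apply sorted_rev_congr
  · exact nodupA _ _ _ _ (PySem.Set.nodup_ofList [])
  · rw [List.perm_ext_iff_of_nodup (nodupA _ _ _ _ (PySem.Set.nodup_ofList []))
      (nodupB _ _ _ _ (PySem.Set.nodup_ofList []))]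
    intro y
    have hA := memA (PySem.List.pyRange 0 (PySem.Str.len s - k + 1) 1)
      (fun i => (PySem.List.pyRange 0 (k - 1) 1).all (fun j =>
        match PySem.Str.pyGet? (PySem.Str.slice s (some i) (some (i + k))) j,
              PySem.Str.pyGet? (PySem.Str.slice s (some i) (some (i + k))) (j + 1) with
        | some c1, some c2 => decide (c1 < c2)
        | _, _ => false))
      (fun i => PySem.Str.slice s (some i) (some (i + k)))
      (PySem.Set.ofList []) y
    have hB := memB (runsFrom s.toList 0) k
      (fun j => PySem.Str.slice s (some j) (some (j + k))) (PySem.Set.ofList []) y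
    refine hA.trans (Iff.trans ?_ hB.symm)
    simp only [PySem.Set.ofList_nil, List.not_mem_nil, false_or]
    constructor
    · rintro ⟨i, hi, hc, rfl⟩
      obtain ⟨hi0, hi1⟩ := PySem.List.mem_pyRange_one.mp hi
      rw [hlen] at hi1
      obtain ⟨ab, hab, h1, h2⟩ := (key_index s k hpre' i).mp ⟨hi0, hi1, hc⟩
      exact ⟨ab, hab, by omega, i, PySem.List.mem_pyRange_one.mpr ⟨h1, h2⟩, rfl⟩
    · rintro ⟨ab, hab, hk2, j, hj, rfl⟩
      obtain ⟨hj1, hj2⟩ := PySem.List.mem_pyRange_one.mp hj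
      obtain ⟨hj0, hjn, hc⟩ := (key_index s k hpre' j).mpr ⟨ab, hab, hj1, hj2⟩
      exact ⟨j, PySem.List.mem_pyRange_one.mpr ⟨hj0, by omega⟩, hc, rfl⟩
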